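-- pv_equiv track=rewrite | github.com/gcivil-nyu-org/nycCivilServiceJobs | scripts/update_civil_services_title.py | trim_parenthesis
-- ===== SOURCE A (Python) =====
-- def trim_parenthesis(s):
--     stack = []
--     for i in range(len(s)):
--         if s[i] == "(":
--             stack.append(i)
--         elif s[i] == ")":
--             stack.pop()
--
--     if len(stack) != 0:
--         index = stack.pop(0)
--         return s[:index]
--
--     return s
-- ===== SOURCE B (Python) =====
-- def trim_parenthesis(s):
--     # Right-to-left scan: pair each '(' with a ')' already seen to its right;
--     # the leftmost '(' that never finds a partner is the cut point.
--     pending = 0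
--     cut = None
--     for i in range(len(s) - 1, -1, -1):
--         c = s[i]
--         if c == ")":
--             pending += 1
--         elif c == "(":
--             if pending:
--                 pending -= 1
--             else:
--                 cut = i
--     return s if cut is None else s[:cut]
-- ===== Notes on version B (the rewrite author's own statement) =====
-- stated objective: alternative
-- what changed: B scans the string right-to-left, pairing each '(' with a ')' already seen to its right and remembering the leftmost '(' that never finds a partner, instead of A's left-to-right index stack with append/pop and a final pop(0); matching pairs is canonical, so both identify the same first unmatched '(' on inputs where A does not raise.
import Mathlib
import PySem

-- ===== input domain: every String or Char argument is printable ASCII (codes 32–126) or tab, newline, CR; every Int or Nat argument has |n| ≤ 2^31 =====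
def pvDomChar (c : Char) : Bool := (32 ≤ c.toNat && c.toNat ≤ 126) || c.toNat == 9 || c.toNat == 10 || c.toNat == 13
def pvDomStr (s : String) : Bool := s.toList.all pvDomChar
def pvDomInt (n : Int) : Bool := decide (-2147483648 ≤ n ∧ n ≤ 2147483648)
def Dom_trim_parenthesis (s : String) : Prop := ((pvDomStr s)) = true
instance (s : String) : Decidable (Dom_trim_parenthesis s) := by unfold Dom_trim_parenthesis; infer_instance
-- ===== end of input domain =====

-- B replaces A's left-to-right index stack by a right-to-left scan that pairs each '('
-- with a ')' to its right and remembers the leftmost unmatched '(' (alternative algorithm,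
-- same cost).

-- ===== PORT A =====
-- A's loop: push the index on '(', pop on ')' (pop from the empty stack is Python's
-- IndexError; excluded by Pre_ below — dropLast of [] is only reached outside Pre_).
def pvALoop (cs : List Char) (i : Nat) (st : List Nat) : List Nat :=
  match cs with
  | [] => st
  | c :: rest =>
      if c = '(' then pvALoop rest (i + 1) (st ++ [i])
      else if c = ')' then pvALoop rest (i + 1) st.dropLast
      else pvALoop rest (i + 1) st

def trim_parenthesis (s : String) : String :=
  let st := pvALoop s.toList 0 []
  if st.length ≠ 0 then
    let index := st.headD 0          -- stack.pop(0): nonempty here by the guard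
    String.mk (PySem.List.slice s.toList none (some (index : Int)))   -- s[:index]
  else s

-- ===== PORT B =====
-- Source B's reversed-index loop 'for i in range(len(s)-1, -1, -1)', as the structural
-- recursion that processes the tail (the rightmost characters) first; the threaded state
-- is Source B's (pending, cut).
def pvBLoop (cs : List Char) (i : Nat) : Nat × Option Nat :=
  match cs with
  | [] => (0, none)
  | c :: rest =>
      let r := pvBLoop rest (i + 1)
      if c = ')' then (r.1 + 1, r.2)
      else if c = '(' then
        if r.1 ≠ 0 then (r.1 - 1, r.2) else (r.1, some i)
      else r

def trim_parenthesis_alt (s : String) : String :=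
  match (pvBLoop s.toList 0).2 with
  | none => s
  | some j => String.mk (PySem.List.slice s.toList none (some (j : Int)))   -- s[:cut]

-- ===== PRECONDITION & SPEC =====
-- Pre_ excludes exactly the inputs on which A raises IndexError (pop from an empty stack):
-- strings with a prefix containing more ')' than '('.
def Pre_trim_parenthesis (s : String) : Prop :=
  ∀ n < s.toList.length + 1, (s.toList.take n).count ')' ≤ (s.toList.take n).count '('
instance (s : String) : Decidable (Pre_trim_parenthesis s) := by
  unfold Pre_trim_parenthesis; infer_instance

def pvWitness_trim_parenthesis : String := "a(b(c)d"

def Spec_trim_parenthesis (s : String) (out : String) : Prop := out = trim_parenthesis_alt s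
instance (s : String) (out : String) : Decidable (Spec_trim_parenthesis s out) := by unfold Spec_trim_parenthesis; infer_instance

-- ===== CLAIM (what is proved, stated in full; the proofs are below) =====
def Claim_equal_trim_parenthesis : Prop := ∀ (s : String), Dom_trim_parenthesis s → Pre_trim_parenthesis s → Spec_trim_parenthesis s (trim_parenthesis s)

-- ===== LEMMAS AND PROOFS =====

-- Proof-side helper: like pvBLoop but carrying the full (increasing) list of unmatched
-- '(' indices instead of only the leftmost one.
def pvV (cs : List Char) (i : Nat) : Nat × List Nat :=
  match cs with
  | [] => (0, [])
  | c :: rest =>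
      let r := pvV rest (i + 1)
      if c = ')' then (r.1 + 1, r.2)
      else if c = '(' then
        if r.1 = 0 then (r.1, i :: r.2) else (r.1 - 1, r.2)
      else r

lemma pvB_eq_V (cs : List Char) : ∀ i, pvBLoop cs i = ((pvV cs i).1, (pvV cs i).2.head?) := by
  induction cs with
  | nil => intro i; simp [pvBLoop, pvV]
  | cons c rest ih =>
      intro i
      simp only [pvBLoop, pvV, ih (i + 1)]
      by_cases h1 : c = ')'
      · simp [h1]
      · by_cases h2 : c = '('
        · by_cases h3 : (pvV rest (i + 1)).1 = 0 <;> simp [h1, h2, h3]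
        · simp [h1, h2]

-- Core invariant: under the no-stray-')' safety condition, A's stack after processing cs
-- is the surviving part of the initial stack followed by cs's unmatched '(' indices.
lemma pvA_eq_V (cs : List Char) : ∀ (i : Nat) (st : List Nat),
    (∀ n, (cs.take n).count ')' ≤ (cs.take n).count '(' + st.length) →
    pvALoop cs i st = st.take (st.length - (pvV cs i).1) ++ (pvV cs i).2 := by
  induction cs with
  | nil => intro i st _; simp [pvALoop, pvV]
  | cons c rest ih =>
      intro i st hsafe
      by_cases h2 : c = '('
      · have hsafe' : ∀ n, (rest.take n).count ')' ≤ (rest.take n).count '(' + (st ++ [i]).length := by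
          intro n
          have h := hsafe (n + 1)
          simp only [List.take_succ_cons, List.count_cons, h2] at h
          simp only [List.length_append, List.length_cons, List.length_nil]
          have e1 : (')' == ')') = true := by decide
          have e2 : ('(' == ')') = false := by decide
          simp [e1, e2] at h ⊢
          omega
        have hrec := ih (i + 1) (st ++ [i]) hsafe'
        simp only [pvALoop, pvV, h2, if_pos rfl]
        have hcpar : ¬ ('(' = ')') := by decide
        simp only [if_neg hcpar]
        rw [hrec]
        by_cases h3 : (pvV rest (i + 1)).1 = 0
        · simp [h3, List.take_of_length_le]
        · simp only [if_neg h3]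
          have hp : 1 ≤ (pvV rest (i + 1)).1 := by omega
          have hle : st.length + 1 - (pvV rest (i + 1)).1 ≤ st.length := by omega
          rw [List.length_append, List.length_cons, List.length_nil]
          rw [List.take_append_of_le_length hle]
          have heq : st.length + 1 - (pvV rest (i + 1)).1 = st.length - ((pvV rest (i + 1)).1 - 1) := by omega
          rw [heq]; simp
      · by_cases h1 : c = ')'
        · have hlen : 1 ≤ st.length := by
            have h := hsafe 1
            simp [h1] at h
            omega
          have hsafe' : ∀ n, (rest.take n).count ')' ≤ (rest.take n).count '(' + st.dropLast.length := by
            intro n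
            have h := hsafe (n + 1)
            simp only [List.take_succ_cons, List.count_cons, h1] at h
            have e1 : (')' == ')') = true := by decide
            have e2 : ('(' == ')') = false := by decide
            simp [e1, e2, List.length_dropLast] at h ⊢
            omega
          have hrec := ih (i + 1) st.dropLast hsafe'
          simp only [pvALoop, pvV, h1, h2, if_neg, if_pos rfl, ite_false]
          rw [hrec, List.length_dropLast, List.dropLast_eq_take, List.take_take]
          have heq : min (st.length - 1 - (pvV rest (i + 1)).1) (st.length - 1) = st.length - ((pvV rest (i + 1)).1 + 1) := by omega
          rw [heq]; simp
        · have hsafe' : ∀ n, (rest.take n).count ')' ≤ (rest.take n).count '(' + st.length := by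
            intro n
            have h := hsafe (n + 1)
            simp only [List.take_succ_cons, List.count_cons] at h
            have e1 : (c == ')') = false := by simpa using h1
            have e2 : (c == '(') = false := by simpa using h2
            simp [e1, e2] at h
            omega
          simp only [pvALoop, pvV, h1, h2, ite_false]
          exact ih (i + 1) st hsafe'

-- ===== VERDICT (by name: the statement is the Claim_ definition above) =====
theorem trim_parenthesis_spec : Claim_equal_trim_parenthesis := by
  intro s _ hpre
  unfold Spec_trim_parenthesis
  have hsafe : ∀ n, (s.toList.take n).count ')' ≤ (s.toList.take n).count '(' + ([] : List Nat).length := by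
    intro n
    by_cases h : n ≤ s.toList.length
    · simpa using hpre n (by omega)
    · have h1 : s.toList.take n = s.toList.take s.toList.length := by
        rw [List.take_of_length_le (by omega), List.take_of_length_le le_rfl]
      rw [h1]
      simpa using hpre s.toList.length (by omega)
  have hA := pvA_eq_V s.toList 0 [] hsafe
  simp only [List.length_nil, Nat.zero_sub, List.take_zero, List.nil_append] at hA
  simp only [trim_parenthesis, trim_parenthesis_alt, pvB_eq_V, hA]
  cases hos : (pvV s.toList 0).2 with
  | nil => simp
  | cons j t => simp
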